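-- pv_equiv track=rewrite | github.com/liangsiwei1994/indivproj | Python App/GraphDrawing.py | check_initial_compromise_complete_mission
-- ===== SOURCE A (Python) =====
-- compulsory_stages_specific_tactics = {
--     'Initial Compromise'    : ['Initial Access'],
--     'Complete Mission'      : ['Collection', 'Exfiltration', 'Impact']
--     }
--
-- def check_initial_compromise_complete_mission(tactic_list):
--     initial_compromise_found = False
--     complete_mission_found = False
--     overall_tactics = []
--     for tactics in tactic_list:
--         for tactic in tactics:
--             overall_tactics.append(tactic)
--
--     if any(tactic in compulsory_stages_specific_tactics['Initial Compromise'] for tactic in overall_tactics):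
--         initial_compromise_found = True
--     if any(tactic in compulsory_stages_specific_tactics['Complete Mission'] for tactic in overall_tactics):
--         complete_mission_found = True
--
--     return initial_compromise_found, complete_mission_found
-- ===== SOURCE B (Python) =====
-- def check_initial_compromise_complete_mission(tactic_list):
--     initial_compromise_found = False
--     complete_mission_found = False
--     for tactics in tactic_list:
--         for tactic in tactics:
--             if tactic == 'Initial Access':
--                 initial_compromise_found = True
--             if tactic in ('Collection', 'Exfiltration', 'Impact'):
--                 complete_mission_found = True
--     return initial_compromise_found, complete_mission_found
-- ===== Notes on version B (the rewrite author's own statement) =====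
-- stated objective: simpler
-- what changed: Drops the intermediate flattened list and the two any() scans; a single fused nested loop updates both booleans inline.
import Mathlib
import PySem

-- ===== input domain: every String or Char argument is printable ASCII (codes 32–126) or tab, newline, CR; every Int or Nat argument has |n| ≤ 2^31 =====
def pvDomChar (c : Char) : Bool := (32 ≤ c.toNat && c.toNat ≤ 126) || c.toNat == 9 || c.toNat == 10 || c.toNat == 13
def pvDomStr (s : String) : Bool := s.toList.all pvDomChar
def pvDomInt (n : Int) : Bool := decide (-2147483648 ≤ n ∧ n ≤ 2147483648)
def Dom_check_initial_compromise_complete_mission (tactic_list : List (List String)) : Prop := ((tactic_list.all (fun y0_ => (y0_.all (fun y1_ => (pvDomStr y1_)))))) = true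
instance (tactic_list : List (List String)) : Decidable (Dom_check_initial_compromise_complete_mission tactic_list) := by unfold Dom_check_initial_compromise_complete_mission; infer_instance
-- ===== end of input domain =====

-- B fuses A's flatten-then-two-any()-scans into one nested loop that updates both booleans inline (simpler; same asymptotic cost).
-- ===== PORT A =====
def check_initial_compromise_complete_mission (tactic_list : List (List String)) : Bool × Bool :=
  let overall_tactics : List String :=
    tactic_list.foldl (fun acc tactics => tactics.foldl (fun a t => a ++ [t]) acc) []
  let initial_compromise_found :=
    if overall_tactics.any (fun t => ["Initial Access"].contains t) then true else false
  let complete_mission_found :=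
    if overall_tactics.any (fun t => ["Collection", "Exfiltration", "Impact"].contains t) then true else false
  (initial_compromise_found, complete_mission_found)

-- ===== PORT B =====
def check_initial_compromise_complete_mission_alt (tactic_list : List (List String)) : Bool × Bool :=
  tactic_list.foldl (fun (st : Bool × Bool) tactics =>
    tactics.foldl (fun (p : Bool × Bool) t =>
      ((if t == "Initial Access" then true else p.1),
       (if t == "Collection" || t == "Exfiltration" || t == "Impact" then true else p.2))) st)
    (false, false)

-- ===== PRECONDITION & SPEC =====
def Spec_check_initial_compromise_complete_mission (tactic_list : List (List String)) (out : Bool × Bool) : Prop := out = check_initial_compromise_complete_mission_alt tactic_list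
instance (tactic_list : List (List String)) (out : Bool × Bool) : Decidable (Spec_check_initial_compromise_complete_mission tactic_list out) := by unfold Spec_check_initial_compromise_complete_mission; infer_instance

-- ===== CLAIM (what is proved, stated in full; the proofs are below) =====
def Claim_equal_check_initial_compromise_complete_mission : Prop := ∀ (tactic_list : List (List String)), Dom_check_initial_compromise_complete_mission tactic_list → Spec_check_initial_compromise_complete_mission tactic_list (check_initial_compromise_complete_mission tactic_list)

-- ===== LEMMAS AND PROOFS =====

theorem pv_foldl_append (ts : List String) (acc : List String) :
    ts.foldl (fun a t => a ++ [t]) acc = acc ++ ts := by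
  induction ts generalizing acc with
  | nil => simp
  | cons h t ih => simp [List.foldl, ih]

theorem pv_outer_append (tl : List (List String)) (acc : List String) :
    tl.foldl (fun acc tactics => tactics.foldl (fun a t => a ++ [t]) acc) acc
      = acc ++ tl.flatten := by
  induction tl generalizing acc with
  | nil => simp
  | cons h t ih => rw [List.foldl_cons, ih, pv_foldl_append]; simp

theorem pv_inner_alt (ts : List String) (p : Bool × Bool) :
    ts.foldl (fun (p : Bool × Bool) t =>
      ((if t == "Initial Access" then true else p.1),
       (if t == "Collection" || t == "Exfiltration" || t == "Impact" then true else p.2))) p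
    = (p.1 || ts.any (fun t => t == "Initial Access"),
       p.2 || ts.any (fun t => t == "Collection" || t == "Exfiltration" || t == "Impact")) := by
  induction ts generalizing p with
  | nil => simp
  | cons h t ih =>
    rw [List.foldl_cons, ih]
    simp only [List.any_cons, Prod.mk.injEq]
    refine ⟨?_, ?_⟩
    · by_cases hb : (h == "Initial Access") = true <;>
        simp [hb, Bool.or_left_comm]
    · by_cases hb : (h == "Collection" || h == "Exfiltration" || h == "Impact") = true <;>
        simp [hb, Bool.or_left_comm, Bool.or_assoc]

theorem pv_outer_alt (tl : List (List String)) (p : Bool × Bool) :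
    tl.foldl (fun (st : Bool × Bool) tactics =>
      tactics.foldl (fun (p : Bool × Bool) t =>
        ((if t == "Initial Access" then true else p.1),
         (if t == "Collection" || t == "Exfiltration" || t == "Impact" then true else p.2))) st) p
    = (p.1 || tl.flatten.any (fun t => t == "Initial Access"),
       p.2 || tl.flatten.any (fun t => t == "Collection" || t == "Exfiltration" || t == "Impact")) := by
  induction tl generalizing p with
  | nil => simp
  | cons h t ih => rw [List.foldl_cons, pv_inner_alt, ih]; simp [Bool.or_assoc]

-- ===== VERDICT (by name: the statement is the Claim_ definition above) =====
theorem check_initial_compromise_complete_mission_spec : Claim_equal_check_initial_compromise_complete_mission := by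
  intro tl _
  unfold Spec_check_initial_compromise_complete_mission
  unfold check_initial_compromise_complete_mission check_initial_compromise_complete_mission_alt
  rw [pv_outer_alt, pv_outer_append]
  simp [List.any_eq, List.contains_eq_mem, or_assoc]
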